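-- pv_equiv track=rewrite | github.com/Viraj-Mathur/3D-Dental-Image-Reconstruction | post.py | computeDeviceCrossovers
-- ===== SOURCE A (Python) =====
-- def computeDeviceCrossovers(websiteVisits, appVisits):
--     # Initialize indices for both visit lists
--     i, j = 0, 0
--     # Initialize the last device as 'website' if the first visit is from the website, otherwise 'app'
--     last_device = None
--     switches = 0
--
--     # Process both lists together based on their sorted timestamps
--     while i < len(websiteVisits) and j < len(appVisits):
--         if websiteVisits[i] < appVisits[j]:
--             # Check if there's a switch from the last device to 'website'
--             if last_device == 'app':
--                 switches += 1
--             # Update last_device and move to the next website visit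
--             last_device = 'website'
--             i += 1
--         else:
--             # Check if there's a switch from the last device to 'app'
--             if last_device == 'website':
--                 switches += 1
--             # Update last_device and move to the next app visit
--             last_device = 'app'
--             j += 1
--
--     # Process any remaining website visits
--     while i < len(websiteVisits):
--         if last_device == 'app':
--             switches += 1
--         last_device = 'website'
--         i += 1
--
--     # Process any remaining app visits
--     while j < len(appVisits):
--         if last_device == 'website':
--             switches += 1
--         last_device = 'app'
--         j += 1
--
--     return switches
-- ===== SOURCE B (Python) =====
-- def computeDeviceCrossovers(websiteVisits, appVisits):
--     # Gap-count formulation: for each app visit, record how many website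
--     # visits the merge places immediately before it (plus the trailing
--     # websites after the last app).  The merged sequence is then
--     # W^g0 A W^g1 A ... A W^gm, and the number of device switches is a
--     # closed-form function of which gaps are non-empty.
--     if len(appVisits) == 0:
--         return 0
--     gaps = []
--     i = 0
--     for a in appVisits:
--         start = i
--         while i < len(websiteVisits) and websiteVisits[i] < a:
--             i += 1
--         gaps.append(i - start)
--     gaps.append(len(websiteVisits) - i)
--     s = (1 if gaps[0] > 0 else 0) + (1 if gaps[-1] > 0 else 0)
--     for g in gaps[1:-1]:
--         if g > 0:
--             s += 2
--     return s
-- ===== Notes on version B (the rewrite author's own statement) =====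
-- stated objective: alternative
-- what changed: B never builds the merged label sequence or tracks a last_device: it records, per app visit, the number of website visits the merge puts before it (a gap list), then obtains the switch count by a closed-form formula (1 for a nonempty first/last gap, 2 for each nonempty interior gap).
import Mathlib
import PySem

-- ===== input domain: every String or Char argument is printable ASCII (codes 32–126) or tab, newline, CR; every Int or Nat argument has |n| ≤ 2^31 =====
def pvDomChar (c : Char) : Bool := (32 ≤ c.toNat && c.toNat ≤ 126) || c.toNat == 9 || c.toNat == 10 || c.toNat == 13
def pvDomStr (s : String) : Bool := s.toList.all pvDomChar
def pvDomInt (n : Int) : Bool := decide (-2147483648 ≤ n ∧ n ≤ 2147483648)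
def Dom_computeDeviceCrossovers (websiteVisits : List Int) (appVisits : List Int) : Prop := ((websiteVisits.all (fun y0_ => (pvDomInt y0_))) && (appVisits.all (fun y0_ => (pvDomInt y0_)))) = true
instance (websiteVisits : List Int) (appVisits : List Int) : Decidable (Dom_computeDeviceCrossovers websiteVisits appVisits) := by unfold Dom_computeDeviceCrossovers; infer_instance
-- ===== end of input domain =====

-- B replaces A's stateful last_device merge by a gap-count decomposition: per app visit
-- the number of websites merged before it, then a closed-form switch formula (alternative).


-- ===== PORT A =====
-- A's three while-loops, as one recursion over the two list tails with the same
-- state (last_device : Option String, switches); branch order and conditions as in A.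
def goA : List Int → List Int → Option String → Int → Int
  | w :: ws, a :: as, last, s =>
    if w < a then
      goA ws (a :: as) (some "website") (if last == some "app" then s + 1 else s)
    else
      goA (w :: ws) as (some "app") (if last == some "website" then s + 1 else s)
  | _ :: ws, [], last, s =>
      goA ws [] (some "website") (if last == some "app" then s + 1 else s)
  | [], _ :: as, last, s =>
      goA [] as (some "app") (if last == some "website" then s + 1 else s)
  | [], [], _, s => s
termination_by ws as _ _ => ws.length + as.length

def computeDeviceCrossovers (websiteVisits : List Int) (appVisits : List Int) : Int :=
  goA websiteVisits appVisits none 0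

-- ===== PORT B =====
-- Source B's gap loop: for each app visit a, the inner while consumes the websites < a
-- (i - start = length of the consumed prefix); the trailing count is appended last.
def gapsB : List Int → List Int → List Int
  | ws, [] => [(ws.length : Int)]
  | ws, a :: as =>
      ((ws.takeWhile (fun w => decide (w < a))).length : Int) ::
        gapsB (ws.dropWhile (fun w => decide (w < a))) as

-- Source B after the gap loop: gaps[0], gaps[-1], and a loop over gaps[1:-1]
def computeDeviceCrossovers_alt (websiteVisits : List Int) (appVisits : List Int) : Int :=
  if appVisits.length = 0 then 0
  else
    let gaps := gapsB websiteVisits appVisits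
    let s : Int := (if 0 < gaps.headD 0 then 1 else 0) + (if 0 < gaps.getLastD 0 then 1 else 0)
    ((gaps.drop 1).dropLast).foldl (fun s g => if 0 < g then s + 2 else s) s

-- ===== PRECONDITION & SPEC =====
def Spec_computeDeviceCrossovers (websiteVisits : List Int) (appVisits : List Int) (out : Int) : Prop := out = computeDeviceCrossovers_alt websiteVisits appVisits
instance (websiteVisits : List Int) (appVisits : List Int) (out : Int) : Decidable (Spec_computeDeviceCrossovers websiteVisits appVisits out) := by unfold Spec_computeDeviceCrossovers; infer_instance

-- ===== CLAIM (what is proved, stated in full; the proofs are below) =====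
def Claim_equal_computeDeviceCrossovers : Prop := ∀ (websiteVisits : List Int) (appVisits : List Int), Dom_computeDeviceCrossovers websiteVisits appVisits → Spec_computeDeviceCrossovers websiteVisits appVisits (computeDeviceCrossovers websiteVisits appVisits)

-- ===== LEMMAS AND PROOFS =====

-- cost of one merge round (a run of k websites, then one app) starting from last
def costA (last : Option String) (k : Nat) : Int :=
  if 0 < k then (if last == some "app" then 1 else 0) + 1
  else (if last == some "website" then 1 else 0)

-- switch count as a function of the gap list (proof-side characterisation)
def F : Option String → List Int → Int
  | _, [] => 0
  | last, [g] => if 0 < g ∧ last == some "app" then 1 else 0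
  | last, g :: r :: rest => costA last g.toNat + F (some "app") (r :: rest)

theorem goA_web_only (ws : List Int) (s : Int) :
    goA ws [] (some "website") s = s := by
  induction ws generalizing s with
  | nil => simp [goA]
  | cons w ws ih => simp only [goA]; simpa using ih s

theorem goA_nil_apps (ws : List Int) (last : Option String) (s : Int) :
    goA ws [] last s = s + (if 0 < ws.length ∧ last == some "app" then 1 else 0) := by
  cases ws with
  | nil => simp [goA]
  | cons w ws =>
    simp only [goA, goA_web_only]
    by_cases h : last = some "app" <;> simp [h]

theorem goA_step (ws : List Int) (a : Int) (as : List Int) (last : Option String) (s : Int) :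
    goA ws (a :: as) last s =
      goA (ws.dropWhile (fun w => decide (w < a))) as (some "app")
        (s + costA last (ws.takeWhile (fun w => decide (w < a))).length) := by
  induction ws generalizing last s with
  | nil =>
    simp only [goA, List.dropWhile_nil, List.takeWhile_nil, List.length_nil]
    congr 1
    by_cases h : last = some "website" <;> simp [h, costA]
  | cons w ws ih =>
    by_cases hlt : w < a
    · have hd : (fun w => decide (w < a)) w = true := by simpa using hlt
      simp only [goA, if_pos hlt, List.dropWhile_cons, List.takeWhile_cons, hd, if_true]
      rw [ih]
      congr 1
      simp only [List.length_cons, costA]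
      by_cases h : last = some "app" <;> simp [h] <;> omega
    · have hd : (fun w => decide (w < a)) w = false := by simpa using hlt
      simp only [goA, if_neg hlt, List.dropWhile_cons, List.takeWhile_cons, hd,
        Bool.false_eq_true, if_false, List.length_nil]
      congr 1
      by_cases h : last = some "website" <;> simp [h, costA]

theorem gapsB_ne_nil (ws as : List Int) : gapsB ws as ≠ [] := by
  cases as <;> simp [gapsB]

theorem gapsB_nonneg (ws as : List Int) : ∀ g ∈ gapsB ws as, 0 ≤ g := by
  induction as generalizing ws with
  | nil => simp [gapsB]
  | cons a as ih =>
    intro g hg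
    simp only [gapsB, List.mem_cons] at hg
    rcases hg with h | h
    · omega
    · exact ih _ _ h

-- goA equals the gap characterisation
theorem goA_eq_F (as : List Int) : ∀ (ws : List Int) (last : Option String) (s : Int),
    goA ws as last s = s + F last (gapsB ws as) := by
  induction as with
  | nil =>
    intro ws last s
    rw [goA_nil_apps]
    simp only [gapsB, F]
    by_cases h : 0 < ws.length <;> by_cases h2 : last = some "app" <;> simp [h, h2]
  | cons a as ih =>
    intro ws last s
    rw [goA_step, ih]
    have hne := gapsB_ne_nil (ws.dropWhile (fun w => decide (w < a))) as
    simp only [gapsB]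
    rcases hr : gapsB (ws.dropWhile (fun w => decide (w < a))) as with _ | ⟨r, rest⟩
    · exact absurd hr hne
    · simp only [F, Int.toNat_natCast]
      ring

-- the foldl over the interior gaps counts 2 per positive gap
theorem foldl_two (gs : List Int) (c : Int) :
    gs.foldl (fun s g => if 0 < g then s + 2 else s) c
      = c + 2 * (gs.countP (fun g => decide (0 < g))) := by
  induction gs generalizing c with
  | nil => simp
  | cons g gs ih =>
    simp only [List.foldl_cons, ih, List.countP_cons]
    by_cases h : 0 < g <;> simp [h] <;> ring

-- F from state "app" over mid ++ [gm]
theorem F_app_append (mid : List Int) (gm : Int) (hnn : ∀ g ∈ mid, 0 ≤ g) :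
    F (some "app") (mid ++ [gm])
      = 2 * (mid.countP (fun g => decide (0 < g))) + (if 0 < gm then 1 else 0) := by
  induction mid with
  | nil => simp [F]
  | cons g mid ih =>
    have hg : 0 ≤ g := hnn g (by simp)
    rcases hm : mid ++ [gm] with _ | ⟨r, rest⟩
    · simp at hm
    · have : F (some "app") (g :: (mid ++ [gm]))
          = costA (some "app") g.toNat + F (some "app") (mid ++ [gm]) := by
        rw [hm]; simp only [F]
      rw [List.cons_append, this, ih (fun x hx => hnn x (by simp [hx]))]
      simp only [List.countP_cons, costA]
      by_cases h : 0 < g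
      · have h2 : 0 < g.toNat := by omega
        simp [h, h2]; ring
      · have h2 : ¬ 0 < g.toNat := by omega
        simp [h, h2]

-- F from the initial state equals Source B's arithmetic over the gap list
theorem F_none_formula (g0 : Int) (tail : List Int) (h : tail ≠ []) (hg0 : 0 ≤ g0)
    (hnn : ∀ g ∈ tail, 0 ≤ g) :
    F none (g0 :: tail)
      = ((g0 :: tail).drop 1).dropLast.foldl (fun s g => if 0 < g then s + 2 else s)
          ((if 0 < (g0 :: tail).headD 0 then 1 else 0)
            + (if 0 < (g0 :: tail).getLastD 0 then 1 else 0)) := by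
  obtain ⟨mid, gm, rfl⟩ : ∃ mid gm, tail = mid ++ [gm] :=
    ⟨tail.dropLast, tail.getLast h, (List.dropLast_append_getLast h).symm⟩
  have hmidnn : ∀ g ∈ mid, 0 ≤ g := fun x hx => hnn x (by simp [hx])
  have hL : F none (g0 :: (mid ++ [gm]))
      = costA none g0.toNat + F (some "app") (mid ++ [gm]) := by
    rcases hm : mid ++ [gm] with _ | ⟨r, rest⟩
    · simp at hm
    · simp only [F]
  have hlast : (g0 :: (mid ++ [gm])).getLastD 0 = gm := by
    rw [show g0 :: (mid ++ [gm]) = (g0 :: mid) ++ [gm] by simp, List.getLastD_concat]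
  rw [hL, F_app_append mid gm hmidnn]
  simp only [List.headD_cons, hlast, List.drop_one, List.tail_cons, List.dropLast_concat,
    foldl_two]
  have hc : costA none g0.toNat = if 0 < g0 then 1 else 0 := by
    simp only [costA]
    by_cases h : 0 < g0
    · have : 0 < g0.toNat := by omega
      simp [this, h]
    · have : ¬ 0 < g0.toNat := by omega
      simp [this, h]
  rw [hc]; ring

-- ===== VERDICT (by name: the statement is the Claim_ definition above) =====
theorem computeDeviceCrossovers_spec : Claim_equal_computeDeviceCrossovers := by
  intro ws as _
  show computeDeviceCrossovers ws as = computeDeviceCrossovers_alt ws as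
  rw [computeDeviceCrossovers, computeDeviceCrossovers_alt, goA_eq_F]
  cases as with
  | nil => simp [gapsB, F]
  | cons a as =>
    simp only [List.length_cons, Nat.add_one_ne_zero, if_false, zero_add, gapsB]
    exact F_none_formula _ _ (gapsB_ne_nil _ _) (by positivity)
      (gapsB_nonneg (ws.dropWhile (fun w => decide (w < a))) as)
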